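-- pv_equiv track=rewrite | github.com/ds-gurukandhamoorthi/intro-python-exs | recursive_squares.py | put_together
-- ===== SOURCE A (Python) =====
-- def put_together(lesser_squares, squares, bit_string):
--     res = []
--     nb_bits = len(bit_string)
--     n = len(lesser_squares) // nb_bits
--     for i,bit in enumerate(bit_string):
--         if bit == '1':
--             res += lesser_squares[i*n : (i+1)*n]
--     res += squares
--     for i,bit in enumerate(bit_string):
--         if bit == '0':
--             res += lesser_squares[i*n : (i+1)*n]
--     return res
-- ===== SOURCE B (Python) =====
-- def put_together(lesser_squares, squares, bit_string):
--     n = len(lesser_squares) // len(bit_string)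
--     ones = []
--     zeros = []
--     for i, bit in enumerate(bit_string):
--         chunk = lesser_squares[i*n : (i+1)*n]
--         if bit == '1':
--             ones += chunk
--         elif bit == '0':
--             zeros += chunk
--     return ones + squares + zeros
-- ===== Notes on version B (the rewrite author's own statement) =====
-- stated objective: alternative
-- what changed: Single pass over bit_string maintaining two accumulators (ones/zeros), slicing each chunk once, instead of A's two separate enumerate passes before and after appending squares.
import Mathlib
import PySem

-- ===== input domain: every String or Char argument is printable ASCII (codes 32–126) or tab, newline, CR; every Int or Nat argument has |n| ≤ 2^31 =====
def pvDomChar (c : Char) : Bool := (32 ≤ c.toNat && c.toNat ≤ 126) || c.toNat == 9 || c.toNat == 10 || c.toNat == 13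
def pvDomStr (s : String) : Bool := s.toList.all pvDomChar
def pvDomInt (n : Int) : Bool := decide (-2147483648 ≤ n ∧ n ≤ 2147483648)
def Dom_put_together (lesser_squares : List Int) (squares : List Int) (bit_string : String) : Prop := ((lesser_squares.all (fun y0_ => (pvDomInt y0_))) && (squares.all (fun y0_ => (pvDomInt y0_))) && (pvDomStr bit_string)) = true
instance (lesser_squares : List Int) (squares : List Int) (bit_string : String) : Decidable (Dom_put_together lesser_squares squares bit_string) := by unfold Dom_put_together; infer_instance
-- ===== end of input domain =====

-- B replaces A's two enumerate passes by a single pass with two accumulators (ones/zeros); alternative decomposition, same cost.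

-- ===== PORT A =====
def put_together (lesser_squares : List Int) (squares : List Int) (bit_string : String) : List Int :=
  let n : Int := (lesser_squares.length : Int) / (bit_string.toList.length : Int)
  let res : List Int :=
    (PySem.List.enumerate bit_string.toList).foldl
      (fun res ib =>
        if ib.2 == '1' then
          res ++ PySem.List.slice lesser_squares (some (ib.1 * n)) (some ((ib.1 + 1) * n))
        else res) []
  let res := res ++ squares
  (PySem.List.enumerate bit_string.toList).foldl
    (fun res ib =>
      if ib.2 == '0' then
        res ++ PySem.List.slice lesser_squares (some (ib.1 * n)) (some ((ib.1 + 1) * n))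
      else res) res

-- ===== PORT B =====
def put_together_alt (lesser_squares : List Int) (squares : List Int) (bit_string : String) : List Int :=
  let n : Int := (lesser_squares.length : Int) / (bit_string.toList.length : Int)
  let p : List Int × List Int :=
    (PySem.List.enumerate bit_string.toList).foldl
      (fun p ib =>
        let chunk := PySem.List.slice lesser_squares (some (ib.1 * n)) (some ((ib.1 + 1) * n))
        if ib.2 == '1' then (p.1 ++ chunk, p.2)
        else if ib.2 == '0' then (p.1, p.2 ++ chunk)
        else p) ([], [])
  p.1 ++ squares ++ p.2

-- ===== PRECONDITION & SPEC =====
-- Pre_ excludes only the empty bit_string, on which A raises ZeroDivisionError.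
def Pre_put_together (lesser_squares : List Int) (squares : List Int) (bit_string : String) : Prop := bit_string ≠ ""
instance (lesser_squares : List Int) (squares : List Int) (bit_string : String) : Decidable (Pre_put_together lesser_squares squares bit_string) := by unfold Pre_put_together; infer_instance
def pvWitness_put_together : List Int × List Int × String := ([1, 2, 3, 4], [9, 16], "10")
def Spec_put_together (lesser_squares : List Int) (squares : List Int) (bit_string : String) (out : List Int) : Prop := out = put_together_alt lesser_squares squares bit_string
instance (lesser_squares : List Int) (squares : List Int) (bit_string : String) (out : List Int) : Decidable (Spec_put_together lesser_squares squares bit_string out) := by unfold Spec_put_together; infer_instance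

-- ===== CLAIM (what is proved, stated in full; the proofs are below) =====
def Claim_equal_put_together : Prop := ∀ (lesser_squares : List Int) (squares : List Int) (bit_string : String), Dom_put_together lesser_squares squares bit_string → Pre_put_together lesser_squares squares bit_string → Spec_put_together lesser_squares squares bit_string (put_together lesser_squares squares bit_string)

-- ===== LEMMAS AND PROOFS =====

-- A's append-chunk fold is accumulator ++ flatMap over the filtered list.
theorem foldl_if_chunk (p : Int × Char → Bool) (f : Int × Char → List Int) :
    ∀ (l : List (Int × Char)) (acc : List Int),
      l.foldl (fun r ib => if p ib then r ++ f ib else r) acc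
        = acc ++ (l.filter p).flatMap f := by
  intro l
  induction l with
  | nil => intro acc; simp
  | cons x xs ih =>
    intro acc
    by_cases h : p x
    · simp [List.foldl, h, ih]
    · simp [List.foldl, h, ih]

-- B's pair fold computes the two filtered flatMaps.
theorem foldl_pair_chunk (f : Int × Char → List Int) :
    ∀ (l : List (Int × Char)) (a b : List Int),
      l.foldl
        (fun (p : List Int × List Int) ib =>
          if ib.2 == '1' then (p.1 ++ f ib, p.2)
          else if ib.2 == '0' then (p.1, p.2 ++ f ib)
          else p) (a, b)
        = (a ++ (l.filter (fun ib => ib.2 == '1')).flatMap f,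
           b ++ (l.filter (fun ib => ib.2 == '0')).flatMap f) := by
  intro l
  induction l with
  | nil => intro a b; simp
  | cons x xs ih =>
    intro a b
    by_cases h1 : x.2 == '1'
    · have h0 : ¬ ((x.2 == '0') = true) := by
        simp only [beq_iff_eq] at h1 ⊢; simp [h1]
      rw [List.foldl_cons, if_pos h1, ih]
      simp [h1, h0]
    · by_cases h0 : x.2 == '0'
      · rw [List.foldl_cons, if_neg h1, if_pos h0, ih]
        simp [h1, h0]
      · rw [List.foldl_cons, if_neg h1, if_neg h0, ih]
        simp [h1, h0]

-- ===== VERDICT (by name: the statement is the Claim_ definition above) =====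
theorem put_together_spec : Claim_equal_put_together := by
  intro ls sq bs _ _
  unfold Spec_put_together put_together put_together_alt
  simp only [foldl_if_chunk, foldl_pair_chunk, List.nil_append, List.append_assoc]
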